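-- pv_equiv track=rewrite | github.com/shinyoungkang1/dox | dox-py/src/dox/parsers/parser.py | _unescape_escaped_text
-- ===== SOURCE A (Python) =====
-- def _unescape_escaped_text(val: str | None) -> str:
--     """Unescape backslash-escaped text used in attributes and markdown spans."""
--     if not val:
--         return ""
--     out: list[str] = []
--     escaping = False
--     for ch in val:
--         if escaping:
--             out.append(ch)
--             escaping = False
--         elif ch == "\\":
--             escaping = True
--         else:
--             out.append(ch)
--     if escaping:
--         out.append("\\")
--     return "".join(out)
-- ===== SOURCE B (Python) =====
-- def _unescape_escaped_text(val: str | None) -> str: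
--     """Unescape backslash-escaped text used in attributes and markdown spans."""
--     if not val:
--         return ""
--     out: list[str] = []
--     i = 0
--     n = len(val)
--     while i < n:
--         if val[i] == "\\" and i + 1 < n:
--             out.append(val[i + 1])
--             i += 2
--         else:
--             out.append(val[i])
--             i += 1
--     return "".join(out)
-- ===== Notes on version B (the rewrite author's own statement) =====
-- stated objective: alternative
-- what changed: Replaces the boolean escaping-flag state machine (with post-loop trailing-backslash fixup) by an index-cursor loop that consumes each escape pair in one two-step jump.
import Mathlib
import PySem

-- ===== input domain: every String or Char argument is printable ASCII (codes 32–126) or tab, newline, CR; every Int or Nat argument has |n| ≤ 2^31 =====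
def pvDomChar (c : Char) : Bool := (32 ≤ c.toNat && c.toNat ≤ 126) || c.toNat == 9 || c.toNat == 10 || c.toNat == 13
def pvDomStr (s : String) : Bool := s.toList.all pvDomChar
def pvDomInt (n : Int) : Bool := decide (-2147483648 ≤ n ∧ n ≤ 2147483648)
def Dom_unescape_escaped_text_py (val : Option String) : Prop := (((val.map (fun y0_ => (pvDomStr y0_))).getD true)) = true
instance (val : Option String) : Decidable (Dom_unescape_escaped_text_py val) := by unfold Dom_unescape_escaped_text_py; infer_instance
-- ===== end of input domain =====

-- B replaces A's escaping-flag state machine by an index-jump loop consuming escape pairs; equivalence of return values.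

-- ===== PORT A =====
-- A's for-loop over the characters with state (out, escaping), then the trailing-backslash fixup.
def pvAStep (st : List Char × Bool) (ch : Char) : List Char × Bool :=
  if st.2 then (st.1 ++ [ch], false)
  else if ch = '\\' then (st.1, true)
  else (st.1 ++ [ch], false)

def unescape_escaped_text_py (val : Option String) : String :=
  match val with
  | none => ""
  | some s =>
    if s = "" then ""
    else
      let st := s.toList.foldl pvAStep ([], false)
      let out := if st.2 then st.1 ++ ['\\'] else st.1
      String.ofList out

-- ===== PORT B =====
-- B's cursor loop: on '\' with a next char, emit the next char and jump two; else emit the char.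
def pvBLoop : List Char → List Char
  | [] => []
  | '\\' :: c :: rest => c :: pvBLoop rest
  | c :: rest => c :: pvBLoop rest

def unescape_escaped_text_py_alt (val : Option String) : String :=
  match val with
  | none => ""
  | some s =>
    if s = "" then ""
    else String.ofList (pvBLoop s.toList)

-- ===== PRECONDITION & SPEC =====
def Spec_unescape_escaped_text_py (val : Option String) (out : String) : Prop := out = unescape_escaped_text_py_alt val
instance (val : Option String) (out : String) : Decidable (Spec_unescape_escaped_text_py val out) := by unfold Spec_unescape_escaped_text_py; infer_instance

-- ===== CLAIM (what is proved, stated in full; the proofs are below) =====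
def Claim_equal_unescape_escaped_text_py : Prop := ∀ (val : Option String), Dom_unescape_escaped_text_py val → Spec_unescape_escaped_text_py val (unescape_escaped_text_py val)

-- ===== LEMMAS AND PROOFS =====

-- B's loop steps over a non-backslash head character.
theorem pvBLoop_cons (c : Char) (r : List Char) (hc : c ≠ '\\') :
    pvBLoop (c :: r) = c :: pvBLoop r := by
  rw [pvBLoop.eq_def]
  split <;> simp_all

-- The loop invariant: running A's fold from state (out, esc) and applying the fixup
-- yields out followed by B's result (with one pending escaped char when esc is set).
theorem pvLoop_eq (l : List Char) : ∀ (out : List Char) (esc : Bool),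
    (let st := l.foldl pvAStep (out, esc)
     if st.2 then st.1 ++ ['\\'] else st.1)
      = out ++ (if esc then (match l with
                             | [] => ['\\']
                             | c :: r => c :: pvBLoop r)
                else pvBLoop l) := by
  induction l with
  | nil =>
    intro out esc
    cases esc <;> simp [pvBLoop]
  | cons c r ih =>
    intro out esc
    cases esc with
    | true =>
      have hstep : pvAStep (out, true) c = (out ++ [c], false) := by simp [pvAStep]
      rw [List.foldl_cons, hstep, ih]
      simp
    | false =>
      have hstep : pvAStep (out, false) c =
          if c = '\\' then (out, true) else (out ++ [c], false) := by simp [pvAStep]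
      by_cases hc : c = '\\'
      · subst hc
        rw [List.foldl_cons, hstep, if_pos rfl, ih]
        cases r <;> simp [pvBLoop]
      · rw [List.foldl_cons, hstep, if_neg hc, ih]
        simp [pvBLoop_cons c r hc]

-- ===== VERDICT (by name: the statement is the Claim_ definition above) =====
theorem unescape_escaped_text_py_spec : Claim_equal_unescape_escaped_text_py := by
  intro val _
  unfold Spec_unescape_escaped_text_py unescape_escaped_text_py unescape_escaped_text_py_alt
  match val with
  | none => rfl
  | some s =>
    by_cases hs : s = ""
    · simp [hs]
    · simp only [if_neg hs]
      rw [pvLoop_eq s.toList [] false]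
      simp
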